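-- pv_equiv track=rewrite | github.com/JohnnyD3pp/Algoritmos-2-Semestre | Atividade 02/Q3.py | descobrir_cliente_que_mais_gastou
-- ===== SOURCE A (Python) =====
-- def descobrir_cliente_que_mais_gastou(total_gasto_por_cliente):
--     cliente_que_mais_gastou = []
--     maior = 0
--     for nome, valor_gasto in total_gasto_por_cliente.items():
--         if valor_gasto == maior:
--             cliente_que_mais_gastou.append(nome)
--         if valor_gasto > maior:
--             cliente_que_mais_gastou = [nome]
--             maior = valor_gasto
--     if maior == 0:
--         cliente_que_mais_gastou = ["Nenhum cliente comprou nada"]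
--     return cliente_que_mais_gastou
-- ===== SOURCE B (Python) =====
-- def descobrir_cliente_que_mais_gastou(total_gasto_por_cliente):
--     maior = max([0, *total_gasto_por_cliente.values()])
--     if maior == 0:
--         return ["Nenhum cliente comprou nada"]
--     return [nome for nome, valor in total_gasto_por_cliente.items() if valor == maior]
-- ===== Notes on version B (the rewrite author's own statement) =====
-- stated objective: simpler
-- what changed: Replaces A's fused running-max loop that incrementally resets/appends to the winner list with two separate passes: compute the maximum spend clamped at 0, then a comprehension filtering the items equal to it.
import Mathlib
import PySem

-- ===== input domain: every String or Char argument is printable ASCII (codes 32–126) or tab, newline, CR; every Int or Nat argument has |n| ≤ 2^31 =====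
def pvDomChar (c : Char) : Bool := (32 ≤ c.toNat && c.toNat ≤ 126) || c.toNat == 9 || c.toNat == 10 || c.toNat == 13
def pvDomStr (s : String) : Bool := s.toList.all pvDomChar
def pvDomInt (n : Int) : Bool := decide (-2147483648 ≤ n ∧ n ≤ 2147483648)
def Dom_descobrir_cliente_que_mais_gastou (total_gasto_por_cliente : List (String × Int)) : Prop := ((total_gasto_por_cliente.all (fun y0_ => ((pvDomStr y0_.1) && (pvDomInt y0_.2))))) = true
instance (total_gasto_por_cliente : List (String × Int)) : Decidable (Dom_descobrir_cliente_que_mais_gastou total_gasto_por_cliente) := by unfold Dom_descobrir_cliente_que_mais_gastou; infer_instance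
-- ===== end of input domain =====

-- B replaces A's fused running-max loop with two simpler passes (max clamped at 0, then a filter); same O(n) cost, clearer code.


-- ===== PORT A =====
-- the loop body: append on equality, then reset list and maior on strict increase (same statement order as A)
def pvStepA (st : List String × Int) (p : String × Int) : List String × Int :=
  let cl := if p.2 = st.2 then st.1 ++ [p.1] else st.1
  if p.2 > st.2 then ([p.1], p.2) else (cl, st.2)

def descobrir_cliente_que_mais_gastou (total_gasto_por_cliente : List (String × Int)) : List String :=
  let res := total_gasto_por_cliente.foldl pvStepA ([], 0)
  if res.2 = 0 then ["Nenhum cliente comprou nada"] else res.1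

-- ===== PORT B =====
def descobrir_cliente_que_mais_gastou_alt (total_gasto_por_cliente : List (String × Int)) : List String :=
  -- Python's max([0, *values]): fold max over the values starting from 0
  let maior := total_gasto_por_cliente.foldl (fun m p => max m p.2) 0
  if maior = 0 then ["Nenhum cliente comprou nada"]
  else (total_gasto_por_cliente.filter (fun p => p.2 = maior)).map Prod.fst

-- ===== PRECONDITION & SPEC =====
def Spec_descobrir_cliente_que_mais_gastou (total_gasto_por_cliente : List (String × Int)) (out : List String) : Prop := out = descobrir_cliente_que_mais_gastou_alt total_gasto_por_cliente
instance (total_gasto_por_cliente : List (String × Int)) (out : List String) : Decidable (Spec_descobrir_cliente_que_mais_gastou total_gasto_por_cliente out) := by unfold Spec_descobrir_cliente_que_mais_gastou; infer_instance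

-- ===== CLAIM (what is proved, stated in full; the proofs are below) =====
def Claim_equal_descobrir_cliente_que_mais_gastou : Prop := ∀ (total_gasto_por_cliente : List (String × Int)), Dom_descobrir_cliente_que_mais_gastou total_gasto_por_cliente → Spec_descobrir_cliente_que_mais_gastou total_gasto_por_cliente (descobrir_cliente_que_mais_gastou total_gasto_por_cliente)

-- ===== LEMMAS AND PROOFS =====
-- B's maximum, as a left fold
def pvMaxB (l : List (String × Int)) : Int := l.foldl (fun m p => max m p.2) 0

lemma pvMaxB_append (l : List (String × Int)) (x : String × Int) :
    pvMaxB (l ++ [x]) = max (pvMaxB l) x.2 := by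
  simp [pvMaxB, List.foldl_append]

lemma pvMaxB_mem_le (l : List (String × Int)) (p : String × Int) (hp : p ∈ l) : p.2 ≤ pvMaxB l := by
  induction l using List.reverseRecOn with
  | nil => simp at hp
  | append_singleton l x ih =>
    rw [pvMaxB_append]
    rcases List.mem_append.1 hp with h | h
    · exact le_trans (ih h) (le_max_left _ _)
    · simp at h; subst h; exact le_max_right _ _

-- invariant: A's fold produces exactly (the names whose value equals the running max, that max)
lemma pvFoldA_inv (l : List (String × Int)) :
    l.foldl pvStepA ([], 0) =
      ((l.filter (fun p => p.2 = pvMaxB l)).map Prod.fst, pvMaxB l) := by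
  induction l using List.reverseRecOn with
  | nil => simp [pvMaxB]
  | append_singleton l x ih =>
    rw [List.foldl_append, ih, pvMaxB_append]
    simp only [List.foldl, pvStepA]
    rcases lt_trichotomy x.2 (pvMaxB l) with h | h | h
    · have hmax : max (pvMaxB l) x.2 = pvMaxB l := max_eq_left h.le
      rw [hmax]
      simp [not_lt.2 h.le, ne_of_lt h, List.filter_append, List.filter_nil]
    · have hmax : max (pvMaxB l) x.2 = pvMaxB l := max_eq_left h.le
      rw [hmax]
      simp [h, List.filter_append, List.filter_nil]
    · have hmax : max (pvMaxB l) x.2 = x.2 := max_eq_right h.le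
      rw [hmax]
      have hfl : l.filter (fun p => p.2 = x.2) = [] := by
        apply List.filter_eq_nil_iff.2
        intro p hp hpv
        simp at hpv
        exact absurd (hpv ▸ pvMaxB_mem_le l p hp) (not_le.2 h)
      simp [h, List.filter_append, List.filter_nil, hfl]

-- ===== VERDICT (by name: the statement is the Claim_ definition above) =====
theorem descobrir_cliente_que_mais_gastou_spec : Claim_equal_descobrir_cliente_que_mais_gastou := by
  intro l _
  show descobrir_cliente_que_mais_gastou l = descobrir_cliente_que_mais_gastou_alt l
  unfold descobrir_cliente_que_mais_gastou descobrir_cliente_que_mais_gastou_alt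
  rw [pvFoldA_inv]
  rfl
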